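-- pv_equiv track=rewrite | github.com/sunitghub/OpenMontage | tools/video/stock_sources/nasa.py | _pick_image_url
-- ===== SOURCE A (Python) =====
-- def _pick_image_url(file_urls: list[str]) -> str:
--     """Pick the best image rendition from a NASA asset manifest.
--
--     Same pattern as videos but for .jpg/.png/.tif. Prefer ``orig``,
--     fall back to ``large``. We skip ``thumb`` and ``small`` because
--     they're too low-res for CLIP embedding quality.
--     """
--     priority = ("orig", "large", "medium")
--     buckets: dict[str, list[str]] = {p: [] for p in priority}
--     for url in file_urls:
--         lower = url.lower()
--         if not lower.endswith((".jpg", ".jpeg", ".png", ".tif", ".tiff")):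
--             continue
--         for p in priority:
--             if f"~{p}." in lower:
--                 buckets[p].append(url)
--                 break
--     for p in priority:
--         if buckets[p]:
--             return buckets[p][0]
--     # Fallback: any jpg/png
--     for url in file_urls:
--         if url.lower().endswith((".jpg", ".jpeg", ".png")):
--             return url
--     return ""
-- ===== SOURCE B (Python) =====
-- def _pick_image_url(file_urls: list[str]) -> str:
--     """Pick the best image rendition from a NASA asset manifest.
--
--     Instead of bucketing every url by rendition, scan the url list once per
--     priority tier and return the first hit; then fall back to any jpg/png.
--     """
--     for p in ("orig", "large", "medium"):
--         for url in file_urls: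
--             lo = url.lower()
--             if lo.endswith((".jpg", ".jpeg", ".png", ".tif", ".tiff")) and f"~{p}." in lo:
--                 return url
--     for url in file_urls:
--         if url.lower().endswith((".jpg", ".jpeg", ".png")):
--             return url
--     return ""
-- ===== Notes on version B (the rewrite author's own statement) =====
-- stated objective: simpler
-- what changed: Replaced the build-all-buckets dict pass (categorize every url, then select) with direct priority-tier scans: for each tier in order, return the first url with an image extension and that tier marker, then the same jpg/png fallback.
import Mathlib
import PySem

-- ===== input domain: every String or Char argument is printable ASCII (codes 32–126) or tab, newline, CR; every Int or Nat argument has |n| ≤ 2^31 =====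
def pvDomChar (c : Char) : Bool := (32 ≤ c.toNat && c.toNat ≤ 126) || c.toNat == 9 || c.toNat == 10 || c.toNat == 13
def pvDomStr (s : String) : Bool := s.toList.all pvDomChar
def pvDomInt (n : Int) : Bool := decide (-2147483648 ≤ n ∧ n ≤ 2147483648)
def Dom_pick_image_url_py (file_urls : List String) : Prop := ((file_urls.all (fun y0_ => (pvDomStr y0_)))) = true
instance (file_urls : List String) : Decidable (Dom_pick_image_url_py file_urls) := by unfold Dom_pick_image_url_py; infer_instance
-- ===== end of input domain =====

-- B replaces A's categorize-everything-then-select dict with direct per-tier scans (simpler, same O(n) cost).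

-- ===== PORT A =====
def pick_image_url_py (file_urls : List String) : String :=
  let priority : List String := ["orig", "large", "medium"]
  let buckets0 : PySem.Dict String (List String) :=
    priority.foldl (fun d p => d.insert p []) PySem.Dict.empty
  let buckets : PySem.Dict String (List String) :=
    file_urls.foldl (fun d url =>
      let lower := PySem.Str.lower url
      if !([".jpg", ".jpeg", ".png", ".tif", ".tiff"].any (fun e => PySem.Str.endswith lower e)) then d
      else
        -- 'for p in priority: if …: append; break' = act on the first matching p
        match priority.find? (fun p => PySem.Str.isIn ("~" ++ p ++ ".") lower) with
        | some p => d.modify p [] (fun l => l ++ [url])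
        | none => d) buckets0
  match priority.find? (fun p => !(buckets.getD p []).isEmpty) with
  | some p => (buckets.getD p []).headD ""   -- buckets[p][0]; the bucket is nonempty here
  | none =>
    match file_urls.find? (fun url => [".jpg", ".jpeg", ".png"].any (fun e => PySem.Str.endswith (PySem.Str.lower url) e)) with
    | some url => url
    | none => ""

-- ===== PORT B =====
def pick_image_url_py_alt (file_urls : List String) : String :=
  match (["orig", "large", "medium"] : List String).findSome? (fun p =>
    file_urls.find? (fun url =>
      let lo := PySem.Str.lower url
      ([".jpg", ".jpeg", ".png", ".tif", ".tiff"].any (fun e => PySem.Str.endswith lo e)) &&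
        PySem.Str.isIn ("~" ++ p ++ ".") lo)) with
  | some url => url
  | none =>
    match file_urls.find? (fun url => [".jpg", ".jpeg", ".png"].any (fun e => PySem.Str.endswith (PySem.Str.lower url) e)) with
    | some url => url
    | none => ""

-- ===== PRECONDITION & SPEC =====
def Spec_pick_image_url_py (file_urls : List String) (out : String) : Prop := out = pick_image_url_py_alt file_urls
instance (file_urls : List String) (out : String) : Decidable (Spec_pick_image_url_py file_urls out) := by unfold Spec_pick_image_url_py; infer_instance

-- ===== CLAIM (what is proved, stated in full; the proofs are below) =====
def Claim_equal_pick_image_url_py : Prop := ∀ (file_urls : List String), Dom_pick_image_url_py file_urls → Spec_pick_image_url_py file_urls (pick_image_url_py file_urls)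

-- ===== LEMMAS AND PROOFS =====

-- Proof-side names for the tests both programs perform.
def pvImg (u : String) : Bool :=
  [".jpg", ".jpeg", ".png", ".tif", ".tiff"].any (fun e => PySem.Str.endswith (PySem.Str.lower u) e)

def pvHas (t u : String) : Bool := PySem.Str.isIn t (PySem.Str.lower u)

def pvMatch (u : String) : Option String :=
  (["orig", "large", "medium"] : List String).find? (fun p => PySem.Str.isIn ("~" ++ p ++ ".") (PySem.Str.lower u))

def pvStep (d : PySem.Dict String (List String)) (url : String) : PySem.Dict String (List String) :=
  if !(pvImg url) then d
  else
    match pvMatch url with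
    | some p => d.modify p [] (fun l => l ++ [url])
    | none => d

def pvBuckets0 : PySem.Dict String (List String) :=
  (["orig", "large", "medium"] : List String).foldl (fun d p => d.insert p []) PySem.Dict.empty

def pvFallback (file_urls : List String) : String :=
  match file_urls.find? (fun url => [".jpg", ".jpeg", ".png"].any (fun e => PySem.Str.endswith (PySem.Str.lower url) e)) with
  | some url => url
  | none => ""

def pvQA (p u : String) : Bool := pvImg u && (pvMatch u == some p)

def pvQB (p u : String) : Bool := pvImg u && pvHas ("~" ++ p ++ ".") u

def pvMainA (urls : List String) : String :=
  match (["orig", "large", "medium"] : List String).find?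
      (fun p => !((urls.foldl pvStep pvBuckets0).getD p []).isEmpty) with
  | some p => ((urls.foldl pvStep pvBuckets0).getD p []).headD ""
  | none => pvFallback urls

def pvMainB (urls : List String) : String :=
  match (["orig", "large", "medium"] : List String).findSome? (fun p => urls.find? (pvQB p)) with
  | some url => url
  | none => pvFallback urls

theorem pvA_eq (urls : List String) : pick_image_url_py urls = pvMainA urls := rfl

theorem pvB_eq (urls : List String) : pick_image_url_py_alt urls = pvMainB urls := rfl

theorem pvMatch_eq (u : String) :
    pvMatch u = if pvHas "~orig." u then some "orig"
      else if pvHas "~large." u then some "large"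
      else if pvHas "~medium." u then some "medium" else none := by
  by_cases h1 : PySem.Chars.isIn ['~','o','r','i','g','.'] (PySem.Chars.lower u.toList) = true <;>
    by_cases h2 : PySem.Chars.isIn ['~','l','a','r','g','e','.'] (PySem.Chars.lower u.toList) = true <;>
      by_cases h3 : PySem.Chars.isIn ['~','m','e','d','i','u','m','.'] (PySem.Chars.lower u.toList) = true <;>
        simp [pvMatch, pvHas, List.find?, h1, h2, h3]

theorem pvBuckets0_getD (p : String) : pvBuckets0.getD p [] = [] := by
  simp [pvBuckets0, PySem.Dict.getD_insert]

theorem pvStep_getD (d : PySem.Dict String (List String)) (u p : String) :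
    (pvStep d u).getD p [] = d.getD p [] ++ (if pvQA p u then [u] else []) := by
  unfold pvStep pvQA
  rcases h : pvImg u with _ | _
  · simp
  · rcases hm : pvMatch u with _ | q
    · simp
    · simp only [Bool.not_true, Bool.false_eq_true, if_false]
      rw [PySem.Dict.getD_modify]
      by_cases hpq : p = q
      · subst hpq; simp
      · have hb : (some q == some p) = false := by
          rw [beq_eq_false_iff_ne]
          simp only [ne_eq, Option.some.injEq]
          exact fun h' => hpq h'.symm
        simp [hb, hpq]

theorem pvBucket_spec (p : String) (urls : List String) :
    ∀ d : PySem.Dict String (List String),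
      (urls.foldl pvStep d).getD p [] = d.getD p [] ++ urls.filter (pvQA p) := by
  induction urls with
  | nil => intro d; simp
  | cons u t ih =>
    intro d
    rw [List.foldl_cons, ih, pvStep_getD, List.filter_cons, List.append_assoc]
    by_cases hq : pvQA p u = true <;> simp [hq]

theorem pvQA_orig (u : String) : pvQA "orig" u = pvQB "orig" u := by
  simp only [pvQA, pvQB, pvMatch_eq]
  by_cases h1 : pvHas "~orig." u = true <;>
    by_cases h2 : pvHas "~large." u = true <;>
      by_cases h3 : pvHas "~medium." u = true <;> simp [h1, h2, h3]

theorem pvQA_large (u : String) (h : pvQB "orig" u = false) : pvQA "large" u = pvQB "large" u := by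
  simp only [pvQA, pvQB, pvMatch_eq] at *
  by_cases hi : pvImg u = true <;>
    by_cases h1 : pvHas "~orig." u = true <;>
      by_cases h2 : pvHas "~large." u = true <;>
        by_cases h3 : pvHas "~medium." u = true <;>
          simp_all
theorem pvQA_medium (u : String) (hO : pvQB "orig" u = false) (hL : pvQB "large" u = false) :
    pvQA "medium" u = pvQB "medium" u := by
  simp only [pvQA, pvQB, pvMatch_eq] at *
  by_cases hi : pvImg u = true <;>
    by_cases h1 : pvHas "~orig." u = true <;>
      by_cases h2 : pvHas "~large." u = true <;>
        by_cases h3 : pvHas "~medium." u = true <;>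
          simp_all

theorem pvMain_eq (urls : List String) : pvMainA urls = pvMainB urls := by
  have hb : ∀ p, (urls.foldl pvStep pvBuckets0).getD p [] = urls.filter (pvQA p) := by
    intro p; rw [pvBucket_spec, pvBuckets0_getD, List.nil_append]
  unfold pvMainA pvMainB
  simp only [List.find?, List.findSome?, hb]
  by_cases hO : urls.filter (pvQB "orig") = []
  · have hOn : ∀ u ∈ urls, pvQB "orig" u = false := by
      intro u hu
      have := (List.filter_eq_nil_iff.mp hO) u hu; simpa using this
    have eO : urls.filter (pvQA "orig") = [] := by
      rw [List.filter_congr (fun u hu => pvQA_orig u)]; exact hO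
    have fO : urls.find? (pvQB "orig") = none := by
      rw [← List.head?_filter, hO]; rfl
    by_cases hL : urls.filter (pvQB "large") = []
    · have hLn : ∀ u ∈ urls, pvQB "large" u = false := by
        intro u hu
        have := (List.filter_eq_nil_iff.mp hL) u hu; simpa using this
      have eL : urls.filter (pvQA "large") = [] := by
        rw [List.filter_congr (fun u hu => pvQA_large u (hOn u hu))]; exact hL
      have fL : urls.find? (pvQB "large") = none := by
        rw [← List.head?_filter, hL]; rfl
      have eM : urls.filter (pvQA "medium") = urls.filter (pvQB "medium") :=
        List.filter_congr (fun u hu => pvQA_medium u (hOn u hu) (hLn u hu))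
      simp only [eO, eL, eM, fO, fL, List.isEmpty_nil, Bool.not_true]
      rcases hM : urls.filter (pvQB "medium") with _ | ⟨v, t⟩
      · simp [hM, ← List.head?_filter]
      · have fM : urls.find? (pvQA "medium") = some v := by
          rw [← List.head?_filter, eM, hM]; rfl
        have fM' : urls.find? (pvQB "medium") = some v := by
          rw [← List.head?_filter, hM]; rfl
        simp [fM, fM']
    · have eL : urls.filter (pvQA "large") = urls.filter (pvQB "large") :=
        List.filter_congr (fun u hu => pvQA_large u (hOn u hu))
      rcases hLv : urls.filter (pvQB "large") with _ | ⟨v, t⟩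
      · exact absurd hLv hL
      · have fLa : urls.find? (pvQA "large") = some v := by
          rw [← List.head?_filter, eL, hLv]; rfl
        have fLb : urls.find? (pvQB "large") = some v := by
          rw [← List.head?_filter, hLv]; rfl
        simp [eO, eL, fO, hLv, fLb, List.isEmpty_nil]
  · have eO : urls.filter (pvQA "orig") = urls.filter (pvQB "orig") :=
      List.filter_congr (fun u hu => pvQA_orig u)
    rcases hOv : urls.filter (pvQB "orig") with _ | ⟨v, t⟩
    · exact absurd hOv hO
    · have fOa : urls.find? (pvQA "orig") = some v := by
        rw [← List.head?_filter, eO, hOv]; rfl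
      have fOb : urls.find? (pvQB "orig") = some v := by
        rw [← List.head?_filter, hOv]; rfl
      simp [eO, hOv, fOb]

-- ===== VERDICT (by name: the statement is the Claim_ definition above) =====
theorem pick_image_url_py_spec : Claim_equal_pick_image_url_py := by
  intro urls _
  unfold Spec_pick_image_url_py
  rw [pvA_eq, pvB_eq, pvMain_eq]
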